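-- pv_equiv track=rewrite | github.com/JHN-noob/lora-placement-vs-rank-domain-adaptation | src/config_schema.py | compute_layer_partitions
-- ===== SOURCE A (Python) =====
-- def compute_layer_partitions(num_hidden_layers: int) -> dict[str, list[int]]:
--     if num_hidden_layers <= 0:
--         raise ValueError("num_hidden_layers must be positive.")
--
--     base = num_hidden_layers // 3
--     remainder = num_hidden_layers % 3
--     sizes = [base, base, base]
--     for index in range(remainder):
--         sizes[index] += 1
--
--     boundaries: list[tuple[int, int]] = []
--     start = 0
--     for size in sizes:
--         end = start + size
--         boundaries.append((start, end))
--         start = end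
--
--     lower = list(range(*boundaries[0]))
--     middle = list(range(*boundaries[1]))
--     upper = list(range(*boundaries[2]))
--     return {
--         "lower": lower,
--         "middle": middle,
--         "upper": upper,
--         "all": list(range(num_hidden_layers)),
--     }
-- ===== SOURCE B (Python) =====
-- def compute_layer_partitions(num_hidden_layers: int) -> dict[str, list[int]]:
--     if num_hidden_layers <= 0:
--         raise ValueError("num_hidden_layers must be positive.")
--     cut1 = (num_hidden_layers + 2) // 3
--     cut2 = (2 * num_hidden_layers + 2) // 3
--     return {
--         "lower": list(range(cut1)),
--         "middle": list(range(cut1, cut2)),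
--         "upper": list(range(cut2, num_hidden_layers)),
--         "all": list(range(num_hidden_layers)),
--     }
-- ===== Notes on version B (the rewrite author's own statement) =====
-- stated objective: simpler
-- what changed: Replaces the size-list loop and the boundary-accumulation loop with two closed-form ceiling cut indices (n+2)//3 and (2n+2)//3 and builds the four ranges directly.
import Mathlib
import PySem

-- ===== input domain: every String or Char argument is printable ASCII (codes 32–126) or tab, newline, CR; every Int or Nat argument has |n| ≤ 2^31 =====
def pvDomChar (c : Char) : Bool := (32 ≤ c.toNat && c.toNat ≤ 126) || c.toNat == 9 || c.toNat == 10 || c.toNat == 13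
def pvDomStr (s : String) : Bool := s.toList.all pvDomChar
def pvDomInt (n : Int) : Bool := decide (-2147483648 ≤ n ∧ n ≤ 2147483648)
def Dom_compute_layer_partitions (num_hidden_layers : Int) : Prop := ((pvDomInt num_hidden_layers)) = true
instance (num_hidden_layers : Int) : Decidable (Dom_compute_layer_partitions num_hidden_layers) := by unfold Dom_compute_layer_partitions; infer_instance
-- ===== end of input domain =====

-- B computes the two third-boundaries in closed form instead of A's two loops (simpler decomposition; same O(n) output cost).

-- ===== PORT A =====
-- sizes[index] += 1 for index drawn from range(remainder); under Pre_ the index is 0 or 1,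
-- in range, so List.set at i.toNat is exact here.
def pvSetAt (xs : List Int) (i : Int) (v : Int) : List Int := xs.set i.toNat v

def compute_layer_partitions (num_hidden_layers : Int) : List (String × List Int) :=
  let base := PySem.Int.floordiv num_hidden_layers 3
  let remainder := PySem.Int.mod num_hidden_layers 3
  let sizes : List Int := [base, base, base]
  let sizes := (PySem.List.pyRange 0 remainder 1).foldl
    (fun sizes index => pvSetAt sizes index (PySem.List.pyGetD sizes index 0 + 1)) sizes
  let st := sizes.foldl
    (fun (acc : List (Int × Int) × Int) size =>
      let e := acc.2 + size
      (acc.1 ++ [(acc.2, e)], e)) ([], 0)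
  let boundaries := st.1
  -- boundaries[0..2] are present under Pre_ (sizes has 3 elements); getD 0/1/2 is exact.
  let b0 := boundaries.getD 0 (0, 0)
  let b1 := boundaries.getD 1 (0, 0)
  let b2 := boundaries.getD 2 (0, 0)
  let lower := PySem.List.pyRange b0.1 b0.2 1
  let middle := PySem.List.pyRange b1.1 b1.2 1
  let upper := PySem.List.pyRange b2.1 b2.2 1
  [("lower", lower), ("middle", middle), ("upper", upper),
   ("all", PySem.List.pyRange 0 num_hidden_layers 1)]

-- ===== PORT B =====
def compute_layer_partitions_alt (num_hidden_layers : Int) : List (String × List Int) :=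
  let cut1 := PySem.Int.floordiv (num_hidden_layers + 2) 3
  let cut2 := PySem.Int.floordiv (2 * num_hidden_layers + 2) 3
  [("lower", PySem.List.pyRange 0 cut1 1),
   ("middle", PySem.List.pyRange cut1 cut2 1),
   ("upper", PySem.List.pyRange cut2 num_hidden_layers 1),
   ("all", PySem.List.pyRange 0 num_hidden_layers 1)]

-- ===== PRECONDITION & SPEC =====
-- A raises ValueError for num_hidden_layers <= 0; those inputs are excluded.
def Pre_compute_layer_partitions (num_hidden_layers : Int) : Prop := 1 ≤ num_hidden_layers
instance (num_hidden_layers : Int) : Decidable (Pre_compute_layer_partitions num_hidden_layers) := by unfold Pre_compute_layer_partitions; infer_instance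
def pvWitness_compute_layer_partitions : Int := 5

def Spec_compute_layer_partitions (num_hidden_layers : Int) (out : List (String × List Int)) : Prop := out = compute_layer_partitions_alt num_hidden_layers
instance (num_hidden_layers : Int) (out : List (String × List Int)) : Decidable (Spec_compute_layer_partitions num_hidden_layers out) := by unfold Spec_compute_layer_partitions; infer_instance

-- ===== CLAIM (what is proved, stated in full; the proofs are below) =====
def Claim_equal_compute_layer_partitions : Prop := ∀ (num_hidden_layers : Int), Dom_compute_layer_partitions num_hidden_layers → Pre_compute_layer_partitions num_hidden_layers → Spec_compute_layer_partitions num_hidden_layers (compute_layer_partitions num_hidden_layers)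

-- ===== LEMMAS AND PROOFS =====

-- ===== VERDICT (by name: the statement is the Claim_ definition above) =====
theorem compute_layer_partitions_spec : Claim_equal_compute_layer_partitions := by
  intro n _ hpre
  unfold Pre_compute_layer_partitions at hpre
  unfold Spec_compute_layer_partitions compute_layer_partitions compute_layer_partitions_alt
  simp only [PySem.Int.floordiv_eq_ediv_of_pos (show (0:Int) < 3 by norm_num),
    PySem.Int.mod_eq_emod_of_pos (show (0:Int) < 3 by norm_num)]
  have h3 : n % 3 = 0 ∨ n % 3 = 1 ∨ n % 3 = 2 := by omega
  rcases h3 with h | h | h <;>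
    rw [h] <;>
    simp [pvSetAt, PySem.List.pyRange_one, List.foldl, PySem.List.pyGetD, List.range_succ] <;>
    refine ⟨?_, ?_, ?_⟩ <;>
    (first
      | (congr 2 <;> omega)
      | (congr 1
         · funext k; omega
         · congr 1; omega))
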